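-- pv_equiv track=rewrite | github.com/jwiegley/scripts | find_duplicates.py | find_keeper_path
-- ===== SOURCE A (Python) =====
-- from typing import Dict, List, Set, Tuple, Optional
--
-- def get_priority_index(path: str, priorities: List[str]) -> Optional[int]:
--     """
--     Determine the priority index for a given path.
--
--     Uses most-specific-match logic: if multiple priority directories match,
--     returns the index of the longest (most specific) matching directory.
--
--     Args:
--         path: File path to check
--         priorities: List of priority directories in order
--
--     Returns:
--         Index of the matching priority directory (lower is higher priority),
--         or None if path doesn't match any priority directory
--     """
--     best_match_index = None
--     best_match_length = 0
--
--     for index, priority_dir in enumerate(priorities):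
--         # Check if path starts with priority directory
--         # Handle both with and without trailing slashes
--         priority_normalized = priority_dir.rstrip('/')
--         path_normalized = path.rstrip('/')
--
--         if path_normalized.startswith(priority_normalized + '/') or \
--            path_normalized == priority_normalized:
--             # Keep the longest (most specific) match
--             if len(priority_normalized) > best_match_length:
--                 best_match_index = index
--                 best_match_length = len(priority_normalized)
--
--     return best_match_index
--
-- def find_keeper_path(paths: List[str], priorities: List[str]) -> str:
--     """
--     Determine which path to keep among duplicates based on priority.
--
--     Args:
--         paths: List of duplicate file paths
--         priorities: List of priority directories in order
--
--     Returns: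
--         The path to keep (highest priority or first encountered)
--     """
--     # Find paths with priority and their indices
--     paths_with_priority = []
--     paths_without_priority = []
--
--     for path in paths:
--         priority_idx = get_priority_index(path, priorities)
--         if priority_idx is not None:
--             paths_with_priority.append((priority_idx, path))
--         else:
--             paths_without_priority.append(path)
--
--     # If any path has a priority, keep the highest priority one
--     if paths_with_priority:
--         # Sort by priority index (lowest index = highest priority)
--         paths_with_priority.sort(key=lambda x: x[0])
--         return paths_with_priority[0][1]
--
--     # If no paths have priority, keep the first one encountered
--     return paths_without_priority[0] if paths_without_priority else paths[0]
-- ===== SOURCE B (Python) =====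
-- from typing import List, Optional
--
-- def _best_priority_index(path: str, priorities: List[str]) -> Optional[int]:
--     """Index of the longest (most specific) priority dir matching path, first
--     index on ties; None if no non-empty priority dir matches."""
--     p = path.rstrip('/')
--     norm = [d.rstrip('/') for d in priorities]
--     lens = [len(d) for d in norm if d and (p.startswith(d + '/') or p == d)]
--     if not lens:
--         return None
--     best = max(lens)
--     for i, d in enumerate(norm):
--         if (p.startswith(d + '/') or p == d) and len(d) == best:
--             return i
--     return None  # unreachable: some entry attains the maximum
--
-- def find_keeper_path(paths: List[str], priorities: List[str]) -> str:
--     """Keep the path whose best-matching priority dir has the smallest index;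
--     first path wins ties; first path overall if nothing matches."""
--     best = None  # (priority_index, path)
--     for path in paths:
--         idx = _best_priority_index(path, priorities)
--         if idx is not None and (best is None or idx < best[0]):
--             best = (idx, path)
--     return best[1] if best is not None else paths[0]
-- ===== Notes on version B (the rewrite author's own statement) =====
-- stated objective: simpler
-- what changed: A collects priority paths into one list and non-priority paths into another, stable-sorts the first by index and takes its head, with a helper that keeps a running longest-match state; B does one pass over paths keeping a single best (index, path) candidate, and its helper computes the maximum matching length first and then returns the first index attaining it.
import Mathlib
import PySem

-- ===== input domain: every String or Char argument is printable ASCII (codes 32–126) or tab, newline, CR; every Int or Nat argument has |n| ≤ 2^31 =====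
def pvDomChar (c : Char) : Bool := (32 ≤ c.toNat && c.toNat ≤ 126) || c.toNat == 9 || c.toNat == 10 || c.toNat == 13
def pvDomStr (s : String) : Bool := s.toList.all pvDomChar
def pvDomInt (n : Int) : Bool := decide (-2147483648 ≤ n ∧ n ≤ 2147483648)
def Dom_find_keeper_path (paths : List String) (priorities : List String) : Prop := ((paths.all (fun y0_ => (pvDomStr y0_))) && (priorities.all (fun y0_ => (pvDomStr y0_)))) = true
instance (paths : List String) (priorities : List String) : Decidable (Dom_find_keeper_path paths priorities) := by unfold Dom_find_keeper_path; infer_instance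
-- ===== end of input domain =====

-- B replaces A's collect-into-two-lists-then-stable-sort with a single pass keeping the best
-- candidate, and A's running-longest-match helper with max-then-first-index; same cost, simpler.

-- Shared primitives both Pythons spell out identically:
-- s.rstrip('/') — PySem has no chars-argument rstrip; exact: drops trailing '/' code points only.
def pvRstripSlash (cs : List Char) : List Char := (cs.reverse.dropWhile (fun c => c == '/')).reverse
-- the test `p.startswith(d + '/') or p == d` both sources write
def pvMatch (p d : List Char) : Bool := PySem.Chars.startswith p (d ++ ['/']) || p == d

-- ===== PORT A =====
def get_priority_index (path : String) (priorities : List String) : Option Int :=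
  ((PySem.List.enumerate priorities 0).foldl
    (fun (st : Option Int × Nat) pr =>
      let pn := pvRstripSlash pr.2.toList
      let pa := pvRstripSlash path.toList
      if pvMatch pa pn then
        (if st.2 < pn.length then (some pr.1, pn.length) else st)
      else st)
    (none, 0)).1

def find_keeper_path (paths : List String) (priorities : List String) : String :=
  let st := paths.foldl
    (fun (st : List (Int × String) × List String) path =>
      match get_priority_index path priorities with
      | some i => (st.1 ++ [(i, path)], st.2)
      | none   => (st.1, st.2 ++ [path]))
    ([], [])
  match PySem.List.sorted st.1 (fun t => t.1) false with
  | (_, p) :: _ => p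
  | [] =>
    match st.2 with
    | p :: _ => p
    | [] => paths.headD ""   -- paths[0]: reached only for paths = [], excluded by Pre_

-- ===== PORT B =====
def best_priority_index (path : String) (priorities : List String) : Option Int :=
  let p := pvRstripSlash path.toList
  let norm := priorities.map (fun d => pvRstripSlash d.toList)
  let lens := (norm.filter (fun d => !d.isEmpty && pvMatch p d)).map (fun d => d.length)
  match lens with
  | [] => none
  | l :: t =>
    let best := t.foldl max l
    (PySem.List.enumerate norm 0).findSome?
      (fun pr => if pvMatch p pr.2 && pr.2.length == best then some pr.1 else none)

def find_keeper_path_alt (paths : List String) (priorities : List String) : String :=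
  let best := paths.foldl
    (fun (best : Option (Int × String)) path =>
      match best_priority_index path priorities with
      | some i =>
        match best with
        | none => some (i, path)
        | some b => if i < b.1 then some (i, path) else some b
      | none => best)
    none
  match best with
  | some b => b.2
  | none => paths.headD ""   -- paths[0]: reached only for paths = [], excluded by Pre_

-- ===== PRECONDITION & SPEC =====
-- A raises IndexError (paths[0] on an empty list) exactly when paths = []; nothing else is excluded.
def Pre_find_keeper_path (paths : List String) (priorities : List String) : Prop := paths ≠ []
instance (paths : List String) (priorities : List String) : Decidable (Pre_find_keeper_path paths priorities) := by unfold Pre_find_keeper_path; infer_instance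
def pvWitness_find_keeper_path : List String × List String := (["a/x", "b/x"], ["b", "a"])

def Spec_find_keeper_path (paths : List String) (priorities : List String) (out : String) : Prop := out = find_keeper_path_alt paths priorities
instance (paths : List String) (priorities : List String) (out : String) : Decidable (Spec_find_keeper_path paths priorities out) := by unfold Spec_find_keeper_path; infer_instance

-- ===== CLAIM (what is proved, stated in full; the proofs are below) =====
def Claim_equal_find_keeper_path : Prop := ∀ (paths : List String) (priorities : List String), Dom_find_keeper_path paths priorities → Pre_find_keeper_path paths priorities → Spec_find_keeper_path paths priorities (find_keeper_path paths priorities)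

-- ===== LEMMAS AND PROOFS =====

-- ---- helper equivalence: get_priority_index = best_priority_index ----

-- A's running state fold, over an already-enumerated, already-normalized list
def pvF (pa : List Char) (st : Option Int × Nat) (t : List (Int × List Char)) : Option Int × Nat :=
  t.foldl (fun st pr =>
    if pvMatch pa pr.2 then (if st.2 < pr.2.length then (some pr.1, pr.2.length) else st) else st) st

-- running maximum of matching lengths
def pvM (pa : List Char) (bl : Nat) (t : List (Int × List Char)) : Nat :=
  t.foldl (fun a pr => if pvMatch pa pr.2 then max a pr.2.length else a) bl

def pvMl (pa : List Char) (bl : Nat) (ds : List (List Char)) : Nat :=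
  ds.foldl (fun a d => if pvMatch pa d then max a d.length else a) bl

-- first index whose entry matches with length L (B's scan)
def pvFirst (pa : List Char) (L : Nat) (t : List (Int × List Char)) : Option Int :=
  t.findSome? (fun pr => if pvMatch pa pr.2 && pr.2.length == L then some pr.1 else none)

lemma pvM_ge (pa : List Char) (t : List (Int × List Char)) : ∀ bl, bl ≤ pvM pa bl t := by
  induction t with
  | nil => intro bl; simp [pvM]
  | cons pr t ih =>
    intro bl
    simp only [pvM, List.foldl_cons]
    by_cases h : pvMatch pa pr.2 = true
    · simp only [h, if_true]
      exact le_trans (le_max_left _ _) (ih _)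
    · simp only [h]; exact ih bl

lemma pvF_spec (pa : List Char) (t : List (Int × List Char)) :
    ∀ bi bl, pvF pa (bi, bl) t =
      (if pvM pa bl t = bl then bi else pvFirst pa (pvM pa bl t) t, pvM pa bl t) := by
  induction t with
  | nil => intro bi bl; simp [pvF, pvM]
  | cons pr t ih =>
    intro bi bl
    by_cases hm : pvMatch pa pr.2 = true
    · by_cases hl : bl < pr.2.length
      · have hM : pvM pa bl (pr :: t) = pvM pa pr.2.length t := by
          simp [pvM, hm, Nat.max_eq_right (le_of_lt hl)]
        have hMge : pr.2.length ≤ pvM pa pr.2.length t := pvM_ge pa t _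
        have hF : pvF pa (bi, bl) (pr :: t) = pvF pa (some pr.1, pr.2.length) t := by
          simp [pvF, hm, hl]
        rw [hF, ih, hM]
        have hne : pvM pa pr.2.length t ≠ bl := by omega
        simp only [hne, if_false]
        by_cases he : pvM pa pr.2.length t = pr.2.length
        · simp [pvFirst, he, hm]
        · have hne2 : pr.2.length ≠ pvM pa pr.2.length t := by omega
          simp only [he, if_false, pvFirst, List.findSome?_cons]
          simp [hm, hne2]
      · have hle : pr.2.length ≤ bl := Nat.le_of_not_lt hl
        have hM : pvM pa bl (pr :: t) = pvM pa bl t := by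
          simp [pvM, hm, Nat.max_eq_left hle]
        have hF : pvF pa (bi, bl) (pr :: t) = pvF pa (bi, bl) t := by
          simp [pvF, hm, hl]
        rw [hF, ih, hM]
        by_cases he : pvM pa bl t = bl
        · simp [he]
        · have hgt : bl < pvM pa bl t := lt_of_le_of_ne (pvM_ge pa t bl) (Ne.symm he)
          have hne2 : pr.2.length ≠ pvM pa bl t := by omega
          simp only [he, if_false, pvFirst, List.findSome?_cons]
          simp [hm, hne2]
    · have hM : pvM pa bl (pr :: t) = pvM pa bl t := by simp [pvM, hm]
      have hF : pvF pa (bi, bl) (pr :: t) = pvF pa (bi, bl) t := by simp [pvF, hm]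
      rw [hF, ih, hM]
      by_cases he : pvM pa bl t = bl
      · simp [he]
      · simp [pvFirst, he, hm]

lemma enumerate_map {α β : Type} (f : α → β) (l : List α) :
    ∀ s : Int, PySem.List.enumerate (l.map f) s
      = (PySem.List.enumerate l s).map (fun pr => (pr.1, f pr.2)) := by
  induction l with
  | nil => intro s; simp [PySem.List.enumerate_nil]
  | cons x t ih => intro s; simp [PySem.List.enumerate_cons, ih]

lemma pvM_enumerate (pa : List Char) (ds : List (List Char)) :
    ∀ (s : Int) (bl : Nat), pvM pa bl (PySem.List.enumerate ds s) = pvMl pa bl ds := by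
  induction ds with
  | nil => intro s bl; simp [pvM, pvMl, PySem.List.enumerate_nil]
  | cons d t ih =>
    intro s bl
    simp only [PySem.List.enumerate_cons, pvM, pvMl, List.foldl_cons] at *
    by_cases h : pvMatch pa d = true <;> simp [h, ih]

lemma lens_foldl_max (pa : List Char) (ds : List (List Char)) :
    ∀ l : Nat, (((ds.filter (fun d => !d.isEmpty && pvMatch pa d)).map (fun d => d.length)).foldl max l)
      = pvMl pa l ds := by
  induction ds with
  | nil => intro l; simp [pvMl]
  | cons d t ih =>
    intro l
    by_cases hm : pvMatch pa d = true
    · by_cases he : d.isEmpty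
      · have hlen : d.length = 0 := by
          cases d <;> simp_all [List.isEmpty]
        simp [he, hm, pvMl, ih, hlen]
      · simp [he, hm, pvMl, ih]
    · simp [hm, pvMl, ih]

lemma priority_index_eq (path : String) (priorities : List String) :
    get_priority_index path priorities = best_priority_index path priorities := by
  set pa := pvRstripSlash path.toList with hpa
  set norm := priorities.map (fun d => pvRstripSlash d.toList) with hnorm
  have hA : get_priority_index path priorities
      = (pvF pa (none, 0) (PySem.List.enumerate norm 0)).1 := by
    unfold get_priority_index pvF
    rw [hnorm, enumerate_map, List.foldl_map]
  rw [hA, pvF_spec]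
  simp only [best_priority_index, ← hpa, ← hnorm]
  rw [pvM_enumerate]
  cases hl : (norm.filter (fun d => !d.isEmpty && pvMatch pa d)).map (fun d => d.length) with
  | nil =>
    have h0 : pvMl pa 0 norm = 0 := by rw [← lens_foldl_max, hl]; rfl
    simp [h0]
  | cons l t =>
    have hbest : t.foldl max l = pvMl pa 0 norm := by
      rw [← lens_foldl_max pa norm 0, hl]
      simp [List.foldl_cons]
    have hlpos : 0 < l := by
      cases hf : norm.filter (fun d => !d.isEmpty && pvMatch pa d) with
      | nil => rw [hf] at hl; simp at hl
      | cons d r =>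
        rw [hf] at hl
        simp only [List.map_cons, List.cons.injEq] at hl
        have hmem : d ∈ norm.filter (fun d => !d.isEmpty && pvMatch pa d) := by
          rw [hf]; exact List.mem_cons_self
        have hd : (!d.isEmpty && pvMatch pa d) = true := (List.mem_filter.mp hmem).2
        have : ¬ d.isEmpty := by simp_all
        have : d ≠ [] := by simpa [List.isEmpty_iff] using this
        have : 0 < d.length := List.length_pos_iff.mpr this
        omega
    have hMpos : pvMl pa 0 norm ≠ 0 := by
      have : l ≤ t.foldl max l := (PySem.List.le_foldl_max t l).1
      omega
    simp only [hMpos, if_false]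
    rw [hbest]
    rfl

-- ---- outer-loop equivalence ----

-- the list of (priority, path) candidates, in path order
def pvWP (priorities : List String) (paths : List String) : List (Int × String) :=
  paths.filterMap (fun p => (get_priority_index p priorities).map (fun i => (i, p)))

def pvWO (priorities : List String) (paths : List String) : List String :=
  paths.filter (fun p => (get_priority_index p priorities).isNone)

-- B's one-pass step on a candidate
def pvMinStep (best : Option (Int × String)) (c : Int × String) : Option (Int × String) :=
  match best with
  | none => some c
  | some b => if c.1 < b.1 then some c else some b

lemma collect_spec (priorities : List String) (paths : List String) :
    ∀ st : List (Int × String) × List String,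
      paths.foldl
        (fun (st : List (Int × String) × List String) path =>
          match get_priority_index path priorities with
          | some i => (st.1 ++ [(i, path)], st.2)
          | none   => (st.1, st.2 ++ [path])) st
      = (st.1 ++ pvWP priorities paths, st.2 ++ pvWO priorities paths) := by
  induction paths with
  | nil => intro st; simp [pvWP, pvWO]
  | cons p t ih =>
    intro st
    cases hg : get_priority_index p priorities with
    | none => simp [hg, ih, pvWP, pvWO]
    | some i => simp [hg, ih, pvWP, pvWO]

lemma bfold_spec (priorities : List String) (paths : List String) :
    ∀ best : Option (Int × String),
      paths.foldl
        (fun (best : Option (Int × String)) path =>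
          match best_priority_index path priorities with
          | some i =>
            match best with
            | none => some (i, path)
            | some b => if i < b.1 then some (i, path) else some b
          | none => best) best
      = (pvWP priorities paths).foldl pvMinStep best := by
  induction paths with
  | nil => intro best; simp [pvWP]
  | cons p t ih =>
    intro best
    have hg := (priority_index_eq p priorities).symm
    cases hb : best_priority_index p priorities with
    | none => simp [hb, ih, pvWP, hg ▸ hb]
    | some i =>
      have hgi : get_priority_index p priorities = some i := by rw [priority_index_eq, hb]
      cases best with
      | none => simp [hb, ih, pvWP, hgi, pvMinStep]
      | some b => simp [hb, ih, pvWP, hgi, pvMinStep]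

lemma insertBy_head (x : Int × String) (acc : List (Int × String)) :
    (PySem.List.insertBy (fun a b => decide (a.1 < b.1)) x acc).head? = pvMinStep acc.head? x := by
  cases acc with
  | nil => simp [PySem.List.insertBy, pvMinStep]
  | cons a t =>
    simp only [PySem.List.insertBy, pvMinStep]
    by_cases h : x.1 < a.1 <;> simp [h]

lemma foldl_insertBy_head (cs : List (Int × String)) :
    ∀ acc : List (Int × String),
      (cs.foldl (fun acc x => PySem.List.insertBy (fun a b => decide (a.1 < b.1)) x acc) acc).head?
        = cs.foldl pvMinStep acc.head? := by
  induction cs with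
  | nil => intro acc; rfl
  | cons c t ih =>
    intro acc
    simp only [List.foldl_cons, ih, insertBy_head]

lemma sorted_head (cs : List (Int × String)) :
    (PySem.List.sorted cs (fun t => t.1) false).head? = cs.foldl pvMinStep none := by
  rw [PySem.List.sorted_eq_foldl_insertBy]
  simpa using foldl_insertBy_head cs []

lemma minStep_fold_isSome (t : List (Int × String)) :
    ∀ b : Int × String, (t.foldl pvMinStep (some b)).isSome := by
  induction t with
  | nil => intro b; rfl
  | cons c r ih =>
    intro b
    simp only [List.foldl_cons, pvMinStep]
    by_cases h : c.1 < b.1 <;> simp [h, ih]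

lemma pvWP_nil_all_none (priorities : List String) (paths : List String)
    (h : pvWP priorities paths = []) :
    pvWO priorities paths = paths := by
  have hall : ∀ p ∈ paths, get_priority_index p priorities = none := by
    intro p hp
    have := List.filterMap_eq_nil_iff.mp h p hp
    cases hg : get_priority_index p priorities with
    | none => rfl
    | some i => rw [hg] at this; simp at this
  unfold pvWO
  rw [List.filter_eq_self]
  intro p hp
  simp [hall p hp]

-- ===== VERDICT (by name: the statement is the Claim_ definition above) =====
theorem find_keeper_path_spec : Claim_equal_find_keeper_path := by
  intro paths priorities _ hpre
  unfold Spec_find_keeper_path find_keeper_path find_keeper_path_alt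
  rw [collect_spec priorities paths ([], [])]
  rw [bfold_spec]
  simp only [List.nil_append]
  cases hwp : pvWP priorities paths with
  | nil =>
    have hwo := pvWP_nil_all_none priorities paths hwp
    rw [hwo]
    cases paths with
    | nil => exact absurd rfl hpre
    | cons p t => simp [PySem.List.sorted]
  | cons c t =>
    have hhead := sorted_head (c :: t)
    have hsome : ((c :: t).foldl pvMinStep none).isSome := by
      simpa [pvMinStep] using minStep_fold_isSome t c
    cases hm : (c :: t).foldl pvMinStep none with
    | none => rw [hm] at hsome; simp at hsome
    | some m =>
      rw [hm] at hhead
      cases hs : PySem.List.sorted (c :: t) (fun t => t.1) false with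
      | nil => rw [hs] at hhead; simp at hhead
      | cons hd tl =>
        rw [hs] at hhead
        simp only [List.head?_cons, Option.some.injEq] at hhead
        subst hhead
        rfl
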